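-- pv_equiv track=rewrite | github.com/xda22-Ding/Error-Correcting-Codes- | a3b.py | createH
-- ===== SOURCE A (Python) =====
-- def createH(bitarr):
-- 	dataLength = len(bitarr)
-- 	numberParity = 1
-- 	indexDatabit = 0
-- 	newbitarr = []
--
-- 	while indexDatabit < dataLength:
-- 		newbitarr.append("p")#set each p the default 0
-- 		templength = 2**(numberParity-1)-1
-- 		for j in range(templength):
-- 			if(indexDatabit+j == dataLength):
-- 				break
-- 			newbitarr.append(bitarr[indexDatabit+j])
-- 		numberParity = numberParity + 1
-- 		indexDatabit = indexDatabit + templength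
-- 	return newbitarr
-- ===== SOURCE B (Python) =====
-- def createH(bitarr):
--     n = len(bitarr)
--     out = []
--     i = 0
--     pos = 1
--     nextpow = 1
--     while i < n:
--         if pos == nextpow:
--             out.append("p")
--             nextpow *= 2
--         else:
--             out.append(bitarr[i])
--             i += 1
--         pos += 1
--     return out
-- ===== Notes on version B (the rewrite author's own statement) =====
-- stated objective: simpler
-- what changed: Replaced A's nested block loop (a parity bit then an inner for-loop over an exponentially growing templength segment) by a single flat while-loop over output positions that appends 'p' whenever the position equals a tracked next-power-of-two and a data bit otherwise.
import Mathlib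
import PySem

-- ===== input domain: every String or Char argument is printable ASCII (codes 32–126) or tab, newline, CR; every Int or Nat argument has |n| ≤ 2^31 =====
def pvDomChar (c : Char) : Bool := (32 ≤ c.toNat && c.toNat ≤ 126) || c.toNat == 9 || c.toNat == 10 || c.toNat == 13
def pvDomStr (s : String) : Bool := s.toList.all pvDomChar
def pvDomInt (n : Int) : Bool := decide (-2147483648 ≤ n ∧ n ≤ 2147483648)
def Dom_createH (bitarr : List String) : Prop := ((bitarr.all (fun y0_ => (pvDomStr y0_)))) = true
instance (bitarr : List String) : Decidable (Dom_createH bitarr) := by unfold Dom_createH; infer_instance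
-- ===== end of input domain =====

-- B replaces A's nested block loop (parity bit, then a for-loop over a segment of
-- exponentially growing templength) by one flat pass over output positions that
-- tracks the next power of two; objective: simpler. Same O(n) cost.

-- ===== PORT A =====
-- inner for-loop: `for j in range(tl): if idx+j == n: break; append bitarr[idx+j]`
-- (counted down on tl with idx advancing; idx here is Python's indexDatabit+j)
def forA (bitarr : List String) (n idx tl : Nat) (acc : List String) : List String :=
  match tl with
  | 0 => acc
  | t + 1 =>
    if idx = n then acc
    else forA bitarr n (idx + 1) t (acc ++ [bitarr.getD idx ""])

-- outer while loop of A; np = numberParity, idx = indexDatabit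
def goA (bitarr : List String) (n np idx : Nat) (acc : List String) : List String :=
  if _h : idx < n then
    goA bitarr n (np + 1) (idx + (2 ^ (np - 1) - 1))
      (forA bitarr n idx (2 ^ (np - 1) - 1) (acc ++ ["p"]))
  else acc
termination_by ((n - idx) * 2 + (2 - np))
decreasing_by
  rcases Nat.lt_or_ge np 2 with h1 | h1
  · have h0 : np - 1 = 0 := by omega
    have : 2 ^ (np - 1) = 1 := by simp [h0]
    omega
  · have : 1 < 2 ^ (np - 1) := Nat.one_lt_two_pow_iff.mpr (by omega)
    omega

def createH (bitarr : List String) : List String :=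
  goA bitarr bitarr.length 1 0 []

-- ===== PORT B =====
-- flat while loop of B; i = data index, pos = output position, nextpow = next power of two
def goB (bitarr : List String) (n i pos nextpow : Nat) (acc : List String) : List String :=
  if _h : i < n then
    if pos = nextpow then
      goB bitarr n i (pos + 1) (nextpow * 2) (acc ++ ["p"])
    else
      goB bitarr n (i + 1) (pos + 1) nextpow (acc ++ [bitarr.getD i ""])
  else acc
termination_by ((n - i) * 3 + (if pos = nextpow then (if pos = 1 then 2 else 1) else 0))
decreasing_by
  · split_ifs <;> omega
  · split_ifs <;> omega

def createH_alt (bitarr : List String) : List String :=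
  goB bitarr bitarr.length 0 1 1 []

-- ===== PRECONDITION & SPEC =====
def Spec_createH (bitarr : List String) (out : List String) : Prop := out = createH_alt bitarr
instance (bitarr : List String) (out : List String) : Decidable (Spec_createH bitarr out) := by unfold Spec_createH; infer_instance

-- ===== CLAIM (what is proved, stated in full; the proofs are below) =====
def Claim_equal_createH : Prop := ∀ (bitarr : List String), Dom_createH bitarr → Spec_createH bitarr (createH bitarr)

-- ===== LEMMAS AND PROOFS =====

-- B's data run between two parity positions equals A's inner for-loop.
theorem goB_run (bitarr : List String) (n : Nat) :
    ∀ (t idx pos nxt : Nat) (acc : List String), pos + t = nxt → idx ≤ n →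
      goB bitarr n idx pos nxt acc =
        if idx + t ≤ n then
          goB bitarr n (idx + t) nxt nxt (forA bitarr n idx t acc)
        else forA bitarr n idx t acc := by
  intro t
  induction t with
  | zero =>
    intro idx pos nxt acc hpt hle
    simp at hpt
    simp [hpt, hle, forA]
  | succ t ih =>
    intro idx pos nxt acc hpt hle
    by_cases hin : idx < n
    · rw [goB]
      have hne : pos ≠ nxt := by omega
      simp only [hin, dif_pos, hne, if_neg, not_false_eq_true]
      rw [ih (idx + 1) (pos + 1) nxt (acc ++ [bitarr.getD idx ""]) (by omega) (by omega)]
      have hfa : forA bitarr n idx (t + 1) acc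
          = forA bitarr n (idx + 1) t (acc ++ [bitarr.getD idx ""]) := by
        rw [forA]; simp [Nat.ne_of_lt hin]
      rw [← hfa]
      have : idx + 1 + t = idx + (t + 1) := by omega
      rw [this]
    · have hidx : idx = n := by omega
      rw [goB]
      simp only [hin, dif_neg, not_false_eq_true]
      have : ¬ idx + (t + 1) ≤ n := by omega
      simp only [this, if_neg, not_false_eq_true]
      rw [forA]
      simp [hidx]

-- A's outer loop at (np, idx) matches B's flat loop at a fresh parity position.
theorem goA_eq_goB (bitarr : List String) (n : Nat) :
    ∀ (k np idx : Nat) (acc : List String),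
      (n - idx) * 2 + (2 - np) ≤ k → 1 ≤ np → idx ≤ n →
      goA bitarr n np idx acc =
        goB bitarr n idx (2 ^ (np - 1)) (2 ^ (np - 1)) acc := by
  intro k
  induction k with
  | zero =>
    intro np idx acc hk hnp hle
    have hnin : ¬ idx < n := by omega
    rw [goA, goB]
    simp [hnin]
  | succ k ih =>
    intro np idx acc hk hnp hle
    by_cases hin : idx < n
    · rw [goA]
      simp only [hin, dif_pos]
      rw [goB]
      simp only [hin, dif_pos]
      have hP1 : 1 ≤ 2 ^ (np - 1) := Nat.one_le_two_pow
      rw [goB_run bitarr n (2 ^ (np - 1) - 1) idx (2 ^ (np - 1) + 1)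
            (2 ^ (np - 1) * 2) (acc ++ ["p"]) (by omega) (by omega)]
      set tl := 2 ^ (np - 1) - 1 with htl
      by_cases hbr : idx + tl ≤ n
      · simp only [hbr, if_pos]
        have hpow : 2 ^ (np + 1 - 1) = 2 ^ (np - 1) * 2 := by
          have : np + 1 - 1 = (np - 1) + 1 := by omega
          rw [this, pow_succ]
        rw [← hpow]
        apply ih
        · rcases Nat.eq_or_lt_of_le hnp with h1 | h1
          · have : tl = 0 := by simp [htl, ← h1]
            omega
          · have : 2 ≤ 2 ^ (np - 1) := by
              have : 1 < 2 ^ (np - 1) := Nat.one_lt_two_pow_iff.mpr (by omega)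
              omega
            omega
        · omega
        · omega
      · simp only [hbr, if_neg, not_false_eq_true]
        rw [goA]
        have hge : ¬ idx + tl < n := by omega
        simp [hge]
    · have hnin : ¬ idx < n := hin
      rw [goA, goB]
      simp [hnin]

-- ===== VERDICT (by name: the statement is the Claim_ definition above) =====
theorem createH_spec : Claim_equal_createH := by
  intro bitarr _hdom
  unfold Spec_createH createH createH_alt
  have := goA_eq_goB bitarr bitarr.length ((bitarr.length - 0) * 2 + (2 - 1)) 1 0 []
    (le_refl _) (le_refl _) (Nat.zero_le _)
  simpa using this
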